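-- pv_equiv track=rewrite | github.com/Bertik23/mathscripts | slr.py | isMatrixTriangular
-- ===== SOURCE A (Python) =====
-- def isMatrixTriangular(matrix):
--     lastRowZeros = -1
--     for row in matrix:
--         rowZeros = 0
--         for i in row:
--             if i == 0:
--                 rowZeros += 1
--             else:
--                 break
--         if rowZeros > lastRowZeros:
--             lastRowZeros = rowZeros
--         else:
--             return False
--     return True
-- ===== SOURCE B (Python) =====
-- def isMatrixTriangular(matrix):
--     def fewerZeros(a, b):
--         # True iff a's leading zero run is strictly shorter than b's,
--         # decided by walking both rows in lockstep (no run lengths compared).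
--         k = 0
--         while k < len(a) and a[k] == 0:
--             if not (k < len(b) and b[k] == 0):
--                 return False
--             k += 1
--         return k < len(b) and b[k] == 0
--     return all(fewerZeros(a, b) for a, b in zip(matrix, matrix[1:]))
-- ===== Notes on version B (the rewrite author's own statement) =====
-- stated objective: alternative
-- what changed: Drops the leading-zero counters and the lastRowZeros accumulator entirely: each adjacent row pair is compared directly by a recursive lockstep walk that decides 'strictly longer zero run' without ever computing a count.
import Mathlib
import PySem

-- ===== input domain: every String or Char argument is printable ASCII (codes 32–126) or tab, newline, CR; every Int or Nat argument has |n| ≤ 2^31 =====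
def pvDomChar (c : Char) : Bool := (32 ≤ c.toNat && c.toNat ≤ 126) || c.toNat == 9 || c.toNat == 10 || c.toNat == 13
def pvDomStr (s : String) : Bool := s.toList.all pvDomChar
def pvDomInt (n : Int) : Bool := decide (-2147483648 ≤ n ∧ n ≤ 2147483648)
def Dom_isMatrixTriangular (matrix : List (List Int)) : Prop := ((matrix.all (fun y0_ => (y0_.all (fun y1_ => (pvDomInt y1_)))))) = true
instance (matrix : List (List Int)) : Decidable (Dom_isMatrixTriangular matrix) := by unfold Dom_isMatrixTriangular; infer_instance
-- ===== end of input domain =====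

-- B drops counts and the accumulator: adjacent rows are compared by a recursive
-- lockstep walk deciding "strictly longer leading-zero run" directly (alternative decomposition).

-- ===== PORT A =====
-- inner loop of A: count leading zeros, break at first nonzero
def pvRowZeros : List Int → Int
  | [] => 0
  | i :: t => if i == 0 then pvRowZeros t + 1 else 0

-- outer loop of A with the lastRowZeros accumulator and early return False
def pvGoA : List (List Int) → Int → Bool
  | [], _ => true
  | row :: rest, lastRowZeros =>
      let rowZeros := pvRowZeros row
      if rowZeros > lastRowZeros then pvGoA rest rowZeros else false

def isMatrixTriangular (matrix : List (List Int)) : Bool := pvGoA matrix (-1)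

-- ===== PORT B =====
-- B's helper: a's leading-zero run strictly shorter than b's, by lockstep walk
def pvFewerZeros : List Int → List Int → Bool
  | a, b =>
    match a with
    | x :: a' =>
        if x == 0 then
          match b with
          | y :: b' => y == 0 && pvFewerZeros a' b'
          | [] => false
        else match b with | y :: _ => y == 0 | [] => false
    | [] => match b with | y :: _ => y == 0 | [] => false

def isMatrixTriangular_alt (matrix : List (List Int)) : Bool :=
  (matrix.zip matrix.tail).all (fun p => pvFewerZeros p.1 p.2)

-- ===== PRECONDITION & SPEC =====
def Spec_isMatrixTriangular (matrix : List (List Int)) (out : Bool) : Prop := out = isMatrixTriangular_alt matrix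
instance (matrix : List (List Int)) (out : Bool) : Decidable (Spec_isMatrixTriangular matrix out) := by unfold Spec_isMatrixTriangular; infer_instance

-- ===== CLAIM (what is proved, stated in full; the proofs are below) =====
def Claim_equal_isMatrixTriangular : Prop := ∀ (matrix : List (List Int)), Dom_isMatrixTriangular matrix → Spec_isMatrixTriangular matrix (isMatrixTriangular matrix)

-- ===== LEMMAS AND PROOFS =====

theorem pvRowZeros_nonneg (a : List Int) : 0 ≤ pvRowZeros a := by
  induction a with
  | nil => simp [pvRowZeros]
  | cons x t ih =>
      by_cases h : x = 0
      · simp [pvRowZeros, h]; omega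
      · simp [pvRowZeros, h]

-- the lockstep walk decides exactly "pvRowZeros a < pvRowZeros b"
theorem pvFewerZeros_eq (a b : List Int) :
    pvFewerZeros a b = decide (pvRowZeros a < pvRowZeros b) := by
  induction a generalizing b with
  | nil =>
      cases b with
      | nil => simp [pvFewerZeros, pvRowZeros]
      | cons y b' =>
          by_cases h : y = 0
          · have := pvRowZeros_nonneg b'
            simp [pvFewerZeros, pvRowZeros, h]; omega
          · simp [pvFewerZeros, pvRowZeros, h]
  | cons x a' ih =>
      by_cases hx : x = 0
      · cases b with
        | nil =>
            have := pvRowZeros_nonneg a'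
            simp [pvFewerZeros, pvRowZeros, hx]; omega
        | cons y b' =>
            by_cases hy : y = 0
            · simp [pvFewerZeros, pvRowZeros, hx, hy, ih]
            · have := pvRowZeros_nonneg a'
              simp only [pvFewerZeros, pvRowZeros, hx]
              simp only [beq_self_eq_true, if_true]
              have hyb : (y == (0:Int)) = false := by simp [hy]
              simp [hyb]
              omega
      · cases b with
        | nil => simp [pvFewerZeros, pvRowZeros, hx]
        | cons y b' =>
            by_cases hy : y = 0
            · have := pvRowZeros_nonneg b'
              simp [pvFewerZeros, pvRowZeros, hx, hy]; omega
            · simp [pvFewerZeros, pvRowZeros, hx, hy]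

-- A's loop = (head count above the accumulator) && B's pairwise check
theorem pvGoA_eq (m : List (List Int)) (last : Int) :
    pvGoA m last =
      ((match m with
        | [] => true
        | r :: _ => decide (last < pvRowZeros r)) &&
       (m.zip m.tail).all (fun p => pvFewerZeros p.1 p.2)) := by
  induction m generalizing last with
  | nil => simp [pvGoA]
  | cons row rest ih =>
      simp only [pvGoA]
      by_cases h : pvRowZeros row > last
      · rw [if_pos h, ih]
        cases rest with
        | nil => simp [h]
        | cons r2 rs =>
            simp only [List.zip_cons_cons, List.tail_cons, List.all_cons]
            simp [h, pvFewerZeros_eq]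
      · rw [if_neg h]
        have : ¬ last < pvRowZeros row := h
        simp [this]

-- ===== VERDICT (by name: the statement is the Claim_ definition above) =====
theorem isMatrixTriangular_spec : Claim_equal_isMatrixTriangular := by
  intro matrix _
  unfold Spec_isMatrixTriangular isMatrixTriangular isMatrixTriangular_alt
  rw [pvGoA_eq]
  cases matrix with
  | nil => simp
  | cons r rest =>
      have hc : (-1 : Int) < pvRowZeros r := by
        have := pvRowZeros_nonneg r
        omega
      simp [hc]
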